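-- pv_equiv track=rewrite | github.com/yangzongwu/leetcode | leetcode2/0401. Binary Watch.py | subreadBinaryWatch
-- ===== SOURCE A (Python) =====
-- def subreadBinaryWatch(num, k,flag):
--     if k==0:
--         return [0]
--     rep = []
--     res = 0
--
--     def dfs(num, k, rep, res,flag):
--         if k == 0:
--             if flag==0:
--                 if res<12:
--                     rep.append(res)
--             else:
--                 if res<60:
--                     rep.append(res)
--         if not num:
--             return
--         else:
--             for i in range(len(num)):
--                 dfs(num[i + 1:], k - 1, rep, res + num[i],flag)
--
--     dfs(num, k, rep, res,flag)
--     return rep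
-- ===== SOURCE B (Python) =====
-- def subreadBinaryWatch(num, k, flag):
--     if k == 0:
--         return [0]
--     if k > len(num):
--         return []
--     limit = 12 if flag == 0 else 60
--     # table[j] = sums of all j-element subsets of the suffix processed so far,
--     # in the same lexicographic-by-index order as picking elements left to right
--     table = [[0]] + [[] for _ in range(k)]
--     for x in reversed(num):
--         table = [[0]] + [[x + s for s in table[j - 1]] + table[j]
--                          for j in range(1, k + 1)]
--     return [s for s in table[k] if s < limit]
-- ===== Notes on version B (the rewrite author's own statement) =====
-- stated objective: alternative
-- what changed: Replaced the mutating DFS (which recurses over every subset, even after k is exhausted) by an iterative right-to-left dynamic-programming pass that maintains, for each j<=k, the list of j-subset sums of the current suffix, plus an early [] return when k exceeds len(num).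
-- outside the precondition, e.g. on subreadBinaryWatch([1, 2], -1, 0): A returns [], B returns [0]
import Mathlib
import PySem

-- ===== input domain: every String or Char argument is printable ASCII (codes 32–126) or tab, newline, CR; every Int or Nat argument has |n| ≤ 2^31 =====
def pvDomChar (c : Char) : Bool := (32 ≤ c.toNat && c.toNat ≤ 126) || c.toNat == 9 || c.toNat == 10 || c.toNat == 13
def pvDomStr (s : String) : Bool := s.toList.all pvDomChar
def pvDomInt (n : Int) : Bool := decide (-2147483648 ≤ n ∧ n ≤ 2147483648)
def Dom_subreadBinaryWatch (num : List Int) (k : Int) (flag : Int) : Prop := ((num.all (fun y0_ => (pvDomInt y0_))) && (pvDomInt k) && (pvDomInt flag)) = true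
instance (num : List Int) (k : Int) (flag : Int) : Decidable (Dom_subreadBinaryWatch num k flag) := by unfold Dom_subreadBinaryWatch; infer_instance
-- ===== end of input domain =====

-- B replaces A's mutating DFS by an iterative DP over subset sizes (alternative decomposition, same results).
-- ===== PORT A =====
-- dfs/loop: dfsA is the body of Python's dfs (the k==0 append, then the index loop);
-- loopA is the 'for i in range(len(num)): dfs(num[i+1:], ...)' loop as structural recursion.
mutual
def dfsA (num : List Int) (k : Int) (res : Int) (flag : Int) : List Int :=
  (if k = 0 then
     (if flag = 0 then (if res < 12 then [res] else [])
      else (if res < 60 then [res] else []))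
   else []) ++ loopA num k res flag
  termination_by (num.length, 1)
def loopA (num : List Int) (k : Int) (res : Int) (flag : Int) : List Int :=
  match num with
  | [] => []
  | x :: t => dfsA t (k - 1) (res + x) flag ++ loopA t k res flag
  termination_by (num.length, 0)
end

def subreadBinaryWatch (num : List Int) (k : Int) (flag : Int) : List Int :=
  if k = 0 then [0] else dfsA num k 0 flag

-- ===== PORT B =====
-- one pass of B's list comprehension: table' = [[0]] + [map (x+.) table[j-1] ++ table[j] for j in 1..k]
def stepB (kn : Nat) (x : Int) (table : List (List Int)) : List (List Int) :=
  [0] :: (List.range kn).map (fun j => ((table.getD j []).map (fun s => x + s)) ++ table.getD (j + 1) [])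

def subreadBinaryWatch_alt (num : List Int) (k : Int) (flag : Int) : List Int :=
  if k = 0 then [0]
  else if (num.length : Int) < k then []
  else
    let limit : Int := if flag = 0 then 12 else 60
    let kn := k.toNat
    let table := num.reverse.foldl (fun t x => stepB kn x t) ([0] :: List.replicate kn [])
    (table.getD kn []).filter (fun s => decide (s < limit))

-- ===== PRECONDITION & SPEC =====
-- Pre_ excludes negative k, outside the natural domain of a count of LEDs to light:
-- there A's empty result and B's negative-index table lookup are both implementation accidents.
def Pre_subreadBinaryWatch (num : List Int) (k : Int) (flag : Int) : Prop := 0 ≤ k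
instance (num : List Int) (k : Int) (flag : Int) : Decidable (Pre_subreadBinaryWatch num k flag) := by unfold Pre_subreadBinaryWatch; infer_instance
def pvWitness_subreadBinaryWatch : List Int × Int × Int := ([1, 2, 4], 2, 0)

def Spec_subreadBinaryWatch (num : List Int) (k : Int) (flag : Int) (out : List Int) : Prop := out = subreadBinaryWatch_alt num k flag
instance (num : List Int) (k : Int) (flag : Int) (out : List Int) : Decidable (Spec_subreadBinaryWatch num k flag out) := by unfold Spec_subreadBinaryWatch; infer_instance

-- ===== CLAIM (what is proved, stated in full; the proofs are below) =====
def Claim_equal_subreadBinaryWatch : Prop := ∀ (num : List Int) (k : Int) (flag : Int), Dom_subreadBinaryWatch num k flag → Pre_subreadBinaryWatch num k flag → Spec_subreadBinaryWatch num k flag (subreadBinaryWatch num k flag)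

-- ===== LEMMAS AND PROOFS =====

-- reference: sums of the k-element subsets of num, in lexicographic-by-index order
def combSums (num : List Int) (k : Nat) : List Int :=
  match k, num with
  | 0, _ => [0]
  | _ + 1, [] => []
  | kk + 1, x :: t => (combSums t kk).map (fun s => x + s) ++ combSums t (kk + 1)

def limitF (flag : Int) : Int := if flag = 0 then 12 else 60

theorem combSums_zero (xs : List Int) : combSums xs 0 = [0] := by rw [combSums]

theorem combSums_succ_nil (kk : Nat) : combSums [] (kk + 1) = [] := by rw [combSums]

theorem combSums_succ_cons (x : Int) (t : List Int) (kk : Nat) :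
    combSums (x :: t) (kk + 1) = (combSums t kk).map (fun s => x + s) ++ combSums t (kk + 1) := by
  rw [combSums]

theorem guard_eq_filter (res flag : Int) :
    (if flag = 0 then (if res < 12 then [res] else []) else (if res < 60 then [res] else []))
      = List.filter (fun s => decide (s < limitF flag)) [res] := by
  unfold limitF
  by_cases hf : flag = 0 <;> simp only [hf, if_pos, if_neg, not_false_iff, List.filter] <;>
    split_ifs with h <;> simp [h]

theorem dfsA_loopA_neg (num : List Int) : ∀ k res flag : Int, k < 0 →
    dfsA num k res flag = [] ∧ loopA num k res flag = [] := by
  induction num with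
  | nil =>
    intro k res flag hk
    rw [dfsA, loopA]
    simp [show ¬ k = 0 by omega]
  | cons x t ih =>
    intro k res flag hk
    have h1 := ih (k - 1) (res + x) flag (by omega)
    have h2 := ih k res flag hk
    constructor
    · rw [dfsA, loopA]
      simp [show ¬ k = 0 by omega, h1.1, h2.2]
    · rw [loopA]
      simp [h1.1, h2.2]

theorem loopA_zero (t : List Int) : ∀ res flag : Int, loopA t 0 res flag = [] := by
  induction t with
  | nil => intro res flag; rw [loopA]
  | cons x s ih =>
    intro res flag
    rw [loopA]
    rw [(dfsA_loopA_neg s (0 - 1) (res + x) flag (by omega)).1, ih]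
    rfl

theorem dfsA_eq_combSums (num : List Int) : ∀ (kn : Nat) (res flag : Int),
    dfsA num (kn : Int) res flag
      = ((combSums num kn).map (fun s => res + s)).filter (fun s => decide (s < limitF flag)) := by
  induction num with
  | nil =>
    intro kn res flag
    match kn with
    | 0 =>
      rw [dfsA, loopA, combSums_zero]
      simpa using guard_eq_filter res flag
    | kk + 1 =>
      have hne : ¬ (((kk + 1 : Nat) : Int) = 0) := by push_cast; omega
      rw [dfsA, loopA, if_neg hne, combSums_succ_nil]
      rfl
  | cons x t ih =>
    intro kn res flag
    match kn with
    | 0 =>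
      rw [dfsA, loopA]
      simp only [Nat.cast_zero]
      rw [(dfsA_loopA_neg t (0 - 1) (res + x) flag (by omega)).1, loopA_zero, combSums_zero]
      simpa using guard_eq_filter res flag
    | kk + 1 =>
      have hne : ¬ (((kk + 1 : Nat) : Int) = 0) := by push_cast; omega
      have hk1 : ((kk + 1 : Nat) : Int) - 1 = (kk : Int) := by push_cast; omega
      have hloop : loopA t ((kk + 1 : Nat) : Int) res flag = dfsA t ((kk + 1 : Nat) : Int) res flag := by
        rw [dfsA, if_neg hne, List.nil_append]
      rw [dfsA, if_neg hne, List.nil_append, loopA, hk1, hloop,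
        ih kk (res + x) flag, ih (kk + 1) res flag, combSums_succ_cons]
      have hass : ∀ s : Int, res + (x + s) = (res + x) + s := by intro s; ring
      simp only [List.map_append, List.filter_append, List.map_map, Function.comp_def, hass]

theorem combSums_long (num : List Int) : ∀ kn : Nat, num.length < kn → combSums num kn = [] := by
  induction num with
  | nil =>
    intro kn h
    match kn with
    | kk + 1 => rw [combSums_succ_nil]
  | cons x t ih =>
    intro kn h
    match kn with
    | kk + 1 =>
      simp only [List.length_cons] at h
      rw [combSums_succ_cons, ih kk (by omega), ih (kk + 1) (by omega)]
      rfl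

theorem getD_range_map {α : Type} (f : Nat → α) (n j : Nat) (d : α) (h : j < n) :
    ((List.range n).map f).getD j d = f j := by
  simp [List.getD, h]

theorem range_map_succ_split {α : Type} (n : Nat) (g : Nat → α) :
    (List.range (n + 1)).map g = g 0 :: (List.range n).map (fun j => g (j + 1)) := by
  rw [List.range_succ_eq_map, List.map_cons, List.map_map]
  rfl

theorem foldl_stepB (kn : Nat) (num : List Int) :
    num.reverse.foldl (fun t x => stepB kn x t) ([0] :: List.replicate kn [])
      = (List.range (kn + 1)).map (fun j => combSums num j) := by
  induction num with
  | nil =>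
    rw [List.reverse_nil, List.foldl_nil, range_map_succ_split, combSums_zero]
    congr 1
    rw [List.map_congr_left (g := fun _ => ([] : List Int))
      (fun j _ => combSums_succ_nil j), List.map_const']
    simp
  | cons x t ih =>
    rw [List.reverse_cons, List.foldl_append, ih, List.foldl_cons, List.foldl_nil]
    conv_rhs => rw [range_map_succ_split kn (fun j => combSums (x :: t) j)]
    simp only [stepB]
    rw [combSums_zero]
    congr 1
    apply List.map_congr_left
    intro j hj
    simp only [List.mem_range] at hj
    rw [getD_range_map _ _ _ _ (by omega), getD_range_map _ _ _ _ (by omega),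
      combSums_succ_cons]

theorem map_add_zero (l : List Int) : l.map (fun s => (0 : Int) + s) = l := by
  simp

-- ===== VERDICT (by name: the statement is the Claim_ definition above) =====
theorem subreadBinaryWatch_spec : Claim_equal_subreadBinaryWatch := by
  intro num k flag _ hpre
  unfold Spec_subreadBinaryWatch subreadBinaryWatch subreadBinaryWatch_alt
  by_cases hk0 : k = 0
  · simp [hk0]
  · simp only [if_neg hk0]
    have hkpos : 0 < k := lt_of_le_of_ne hpre (Ne.symm hk0)
    have hkn : ((k.toNat : Nat) : Int) = k := Int.toNat_of_nonneg hpre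
    have hA : dfsA num k 0 flag
        = ((combSums num k.toNat).map (fun s => (0 : Int) + s)).filter (fun s => decide (s < limitF flag)) := by
      rw [← hkn]; exact dfsA_eq_combSums num k.toNat 0 flag
    rw [map_add_zero] at hA
    by_cases hlen : (num.length : Int) < k
    · have : combSums num k.toNat = [] := combSums_long num k.toNat (by omega)
      simp [hlen, hA, this]
    · simp only [if_neg hlen]
      rw [hA, foldl_stepB, getD_range_map _ _ _ _ (by omega)]
      rfl
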